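-- pv_equiv track=rewrite | github.com/junjange/uttug-seuja-algorithm | 조준장/level2/택배상자.py | solution
-- ===== SOURCE A (Python) =====
-- from collections import deque
--
-- def solution(order):
--     answer = 0
--     n = len(order)
--     box = deque([i for i in range(1, n+1)])
--     order = deque(order)
--     stack = deque([])
--
--     for _ in range(n*4):
--         if not stack and not order and not box:
--             break
--
--         if order and box and order[0] == box[0]:
--             box.popleft()
--             order.popleft()
--             answer += 1
--         elif stack and order and stack[-1] == order[0]:
--             order.popleft()
--             stack.pop()
--             answer += 1
--         else:
--             if box:
--                 stack.append(box.popleft())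
--
--     return answer
-- ===== SOURCE B (Python) =====
-- def solution(order):
--     stack = []
--     idx = 0
--     answer = 0
--     for i in range(1, len(order) + 1):
--         stack.append(i)
--         while stack and idx < len(order) and stack[-1] == order[idx]:
--             stack.pop()
--             idx += 1
--             answer += 1
--     return answer
-- ===== Notes on version B (the rewrite author's own statement) =====
-- stated objective: simpler
-- what changed: Replaces the fixed n*4-iteration flat branch-dispatch over three deques by the standard stack simulation: one for-loop pushing each box 1..n followed by an inner while popping every box matching the next wanted one, so the direct box-to-order fast path, the box deque and the break/idle bookkeeping disappear.
import Mathlib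
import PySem

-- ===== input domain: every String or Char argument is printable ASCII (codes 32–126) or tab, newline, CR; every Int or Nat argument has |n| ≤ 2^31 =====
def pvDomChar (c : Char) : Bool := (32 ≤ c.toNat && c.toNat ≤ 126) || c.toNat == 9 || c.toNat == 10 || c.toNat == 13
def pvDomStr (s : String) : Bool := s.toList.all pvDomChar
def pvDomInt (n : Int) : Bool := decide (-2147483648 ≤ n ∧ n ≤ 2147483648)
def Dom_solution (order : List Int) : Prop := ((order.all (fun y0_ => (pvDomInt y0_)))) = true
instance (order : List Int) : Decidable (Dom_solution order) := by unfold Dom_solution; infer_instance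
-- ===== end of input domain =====

-- B replaces A's fixed n*4-step flat dispatch over three deques by the standard
-- push-then-pop stack simulation (one for over the boxes, an inner while): simpler, same O(n) cost.

-- ===== PORT A =====
-- A's deques are encoded as lists with the accessed end at the head:
-- `box`/`order` are popped at the left (head = cons-head); `stack` is
-- appended/popped/peeked at the right, so its RIGHT end is the list head here.
-- The `for _ in range(n*4)` loop with `break` is the fuel recursion below
-- (fuel = remaining iterations; running out of fuel = the for-loop ending).
def loopA : Nat → List Int → List Int → List Int → Int → Int
  | 0, _, _, _, ans => ans
  | f+1, box, ord, stack, ans =>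
    if stack = [] ∧ ord = [] ∧ box = [] then ans
    else if ord ≠ [] ∧ box ≠ [] ∧ ord.head? = box.head? then
      loopA f box.tail ord.tail stack (ans + 1)
    else if stack ≠ [] ∧ ord ≠ [] ∧ stack.head? = ord.head? then
      loopA f box ord.tail stack.tail (ans + 1)
    else if hb : box ≠ [] then
      loopA f box.tail ord (box.head hb :: stack) ans
    else
      loopA f box ord stack ans

def solution (order : List Int) : Int :=
  loopA (order.length * 4) (PySem.List.pyRange 1 ((order.length : Int) + 1) 1) order [] 0

-- ===== PORT B =====
-- B's `stack` is likewise encoded with its right (accessed) end at the list head.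
-- inner `while stack and idx < len(order) and stack[-1] == order[idx]`
def altWhile (order : List Int) : List Int → Int → Int → List Int × Int × Int
  | [], idx, ans => ([], idx, ans)
  | t :: st, idx, ans =>
    if idx < (order.length : Int) ∧ PySem.List.pyGet? order idx = some t then
      altWhile order st (idx + 1) (ans + 1)
    else (t :: st, idx, ans)

def solution_alt (order : List Int) : Int :=
  ((PySem.List.pyRange 1 ((order.length : Int) + 1) 1).foldl
      (fun (s : List Int × Int × Int) i => altWhile order (i :: s.1) s.2.1 s.2.2)
      ([], 0, 0)).2.2

-- ===== PRECONDITION & SPEC =====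
def Spec_solution (order : List Int) (out : Int) : Prop := out = solution_alt order
instance (order : List Int) (out : Int) : Decidable (Spec_solution order out) := by unfold Spec_solution; infer_instance

-- ===== CLAIM (what is proved, stated in full; the proofs are below) =====
def Claim_equal_solution : Prop := ∀ (order : List Int), Dom_solution order → Spec_solution order (solution order)

-- ===== LEMMAS AND PROOFS =====

-- The fuel-free greedy process A simulates (same branch order as A's loop body).
def greedy (box ord stack : List Int) (ans : Int) : Int :=
  if h1 : ord ≠ [] ∧ box ≠ [] ∧ ord.head? = box.head? then
    greedy box.tail ord.tail stack (ans + 1)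
  else if h2 : stack ≠ [] ∧ ord ≠ [] ∧ stack.head? = ord.head? then
    greedy box ord.tail stack.tail (ans + 1)
  else if hb : box ≠ [] then
    greedy box.tail ord (box.head hb :: stack) ans
  else
    ans
termination_by 2 * box.length + ord.length + stack.length
decreasing_by
  · have hb := List.length_pos_of_ne_nil h1.2.1
    have ho := List.length_pos_of_ne_nil h1.1
    simp [List.length_tail]; omega
  · have hs := List.length_pos_of_ne_nil h2.1
    have ho := List.length_pos_of_ne_nil h2.2.1
    simp [List.length_tail]; omega
  · have hb' := List.length_pos_of_ne_nil hb
    simp [List.length_tail]; omega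

-- B's inner while, phrased on the remaining order list instead of an index.
def popW : List Int → List Int → Int → List Int × List Int × Int
  | [], ord, ans => ([], ord, ans)
  | t :: st, ord, ans =>
    if ord.head? = some t then popW st ord.tail (ans + 1)
    else (t :: st, ord, ans)

-- B's outer loop, phrased on the remaining order list.
def runB : List Int → List Int → List Int → Int → Int
  | [], _, _, ans => ans
  | b :: bt, ord, stack, ans =>
    let r := popW (b :: stack) ord ans
    runB bt r.2.1 r.1 r.2.2

theorem loopA_stuck (f : Nat) (ord stack : List Int) (ans : Int)
    (h : ¬ (stack ≠ [] ∧ ord ≠ [] ∧ stack.head? = ord.head?)) :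
    loopA f [] ord stack ans = ans := by
  induction f with
  | zero => rfl
  | succ f ih =>
    show (if stack = [] ∧ ord = [] ∧ ([] : List Int) = [] then ans
      else if ord ≠ [] ∧ ([] : List Int) ≠ [] ∧ ord.head? = ([] : List Int).head? then
        loopA f ([] : List Int).tail ord.tail stack (ans + 1)
      else if stack ≠ [] ∧ ord ≠ [] ∧ stack.head? = ord.head? then
        loopA f ([] : List Int) ord.tail stack.tail (ans + 1)
      else if hb : ([] : List Int) ≠ [] then
        loopA f ([] : List Int).tail ord ((([] : List Int).head hb) :: stack) ans
      else loopA f ([] : List Int) ord stack ans) = ans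
    by_cases hz : stack = [] ∧ ord = [] ∧ ([] : List Int) = []
    · rw [if_pos hz]
    · rw [if_neg hz, if_neg (by simp : ¬ (ord ≠ [] ∧ ([] : List Int) ≠ [] ∧ ord.head? = ([] : List Int).head?)),
        if_neg h, dif_neg (by simp : ¬ (([] : List Int) ≠ []))]
      exact ih

theorem loopA_unfold (f : Nat) (box ord stack : List Int) (ans : Int) :
    loopA (f + 1) box ord stack ans =
      (if stack = [] ∧ ord = [] ∧ box = [] then ans
      else if ord ≠ [] ∧ box ≠ [] ∧ ord.head? = box.head? then
        loopA f box.tail ord.tail stack (ans + 1)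
      else if stack ≠ [] ∧ ord ≠ [] ∧ stack.head? = ord.head? then
        loopA f box ord.tail stack.tail (ans + 1)
      else if hb : box ≠ [] then
        loopA f box.tail ord (box.head hb :: stack) ans
      else loopA f box ord stack ans) := rfl

theorem loopA_eq_greedy (f : Nat) :
    ∀ (box ord stack : List Int) (ans : Int),
      2 * box.length + ord.length + stack.length ≤ f →
      loopA f box ord stack ans = greedy box ord stack ans := by
  induction f with
  | zero =>
    intro box ord stack ans hμ
    have hb : box = [] := by cases box <;> simp_all
    have ho : ord = [] := by cases ord <;> simp_all
    have hs : stack = [] := by cases stack <;> simp_all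
    subst hb; subst ho; subst hs
    rw [greedy]; rfl
  | succ f ih =>
    intro box ord stack ans hμ
    rw [greedy, loopA_unfold]
    by_cases h1 : ord ≠ [] ∧ box ≠ [] ∧ ord.head? = box.head?
    · have hbo := List.length_pos_of_ne_nil h1.2.1
      have hoo := List.length_pos_of_ne_nil h1.1
      have hz : ¬ (stack = [] ∧ ord = [] ∧ box = []) := by
        intro hc; exact h1.1 hc.2.1
      rw [if_neg hz, if_pos h1, dif_pos h1]
      exact ih _ _ _ _ (by simp [List.length_tail]; omega)
    · rw [dif_neg h1, if_neg h1]
      by_cases h2 : stack ≠ [] ∧ ord ≠ [] ∧ stack.head? = ord.head?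
      · have hso := List.length_pos_of_ne_nil h2.1
        have hoo := List.length_pos_of_ne_nil h2.2.1
        have hz : ¬ (stack = [] ∧ ord = [] ∧ box = []) := by
          intro hc; exact h2.1 hc.1
        rw [if_neg hz, if_pos h2, dif_pos h2]
        exact ih _ _ _ _ (by simp [List.length_tail]; omega)
      · rw [dif_neg h2, if_neg h2]
        by_cases hb : box ≠ []
        · have hbo := List.length_pos_of_ne_nil hb
          have hz : ¬ (stack = [] ∧ ord = [] ∧ box = []) := by
            intro hc; exact hb hc.2.2
          rw [if_neg hz, dif_pos hb, dif_pos hb]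
          exact ih _ _ _ _ (by simp [List.length_tail]; omega)
        · rw [dif_neg hb, dif_neg hb]
          have hbe : box = [] := not_not.mp hb
          subst hbe
          by_cases hz : stack = [] ∧ ord = [] ∧ ([] : List Int) = []
          · rw [if_pos hz]
          · rw [if_neg hz]
            exact loopA_stuck f ord stack ans h2

theorem greedy_eq_runB :
    ∀ (box ord stack : List Int) (ans : Int),
      (stack ++ box).Nodup →
      greedy box ord stack ans =
        runB box (popW stack ord ans).2.1 (popW stack ord ans).1 (popW stack ord ans).2.2 := by
  intro box ord stack ans
  induction box, ord, stack, ans using greedy.induct with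
  | case1 box ord stack ans h1 ih =>
    intro hnd
    obtain ⟨ho, hb, he⟩ := h1
    cases box with
    | nil => exact absurd rfl hb
    | cons b bt =>
      cases ord with
      | nil => exact absurd rfl ho
      | cons o ot =>
        have hob : b = o := by simpa using he.symm
        subst hob
        have hpw : popW stack (b :: ot) ans = (stack, b :: ot, ans) := by
          cases stack with
          | nil => rfl
          | cons s st =>
            have hs : b ≠ s := by
              intro hbs
              exact (List.nodup_append.mp hnd).2.2 s (by simp) s (by simp [hbs]) rfl
            simp [popW, hs]
        rw [greedy, dif_pos ⟨ho, hb, he⟩]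
        rw [hpw]
        simp only [runB]
        have hpw2 : popW (b :: stack) (b :: ot) ans = popW stack ot (ans + 1) := by
          simp [popW]
        rw [hpw2]
        have hnd' : (stack ++ bt).Nodup := by
          rw [List.nodup_append] at hnd ⊢
          exact ⟨hnd.1, (List.nodup_cons.mp hnd.2.1).2,
            fun a ha b' hb' => hnd.2.2 a ha b' (List.mem_cons_of_mem _ hb')⟩
        have := ih (by simpa using hnd')
        simpa using this
  | case2 box ord stack ans h1 h2 ih =>
    intro hnd
    obtain ⟨hs, ho, he⟩ := h2
    cases stack with
    | nil => exact absurd rfl hs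
    | cons s st =>
      cases ord with
      | nil => exact absurd rfl ho
      | cons o ot =>
        have hso : s = o := by simpa using he
        subst hso
        rw [greedy, dif_neg h1, dif_pos ⟨hs, ho, he⟩]
        have hpw : popW (s :: st) (s :: ot) ans = popW st ot (ans + 1) := by
          simp [popW]
        rw [hpw]
        have hnd' : (st ++ box).Nodup := (List.nodup_cons.mp hnd).2
        have := ih (by simpa using hnd')
        simpa using this
  | case3 box ord stack ans h1 h2 hb ih =>
    intro hnd
    cases box with
    | nil => exact absurd rfl hb
    | cons b bt =>
    rw [greedy, dif_neg h1, dif_neg h2, dif_pos hb]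
    simp only [List.head_cons, List.tail_cons] at ih ⊢
    have hpw : popW stack ord ans = (stack, ord, ans) := by
      cases stack with
      | nil => rfl
      | cons s st =>
        have hns : ¬ (ord.head? = some s) := by
          intro hc
          exact h2 ⟨by simp, by rintro rfl; simp at hc, by simp [hc]⟩
        simp [popW, hns]
    rw [hpw]
    simp only [runB]
    have hbo : ¬ (ord.head? = some b) := by
      intro hc
      exact h1 ⟨by rintro rfl; simp at hc, by simp, by simpa using hc⟩
    have hpw2 : popW (b :: stack) ord ans = (b :: stack, ord, ans) := by
      simp [popW, hbo]
    have hnd' : ((b :: stack) ++ bt).Nodup := List.perm_middle.nodup hnd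
    have := ih (by simpa using hnd')
    rw [hpw2] at this ⊢
    exact this
  | case4 box ord stack ans h1 h2 hb =>
    intro _
    rw [greedy, dif_neg h1, dif_neg h2, dif_neg hb]
    have hbe : box = [] := not_not.mp hb
    subst hbe
    have hpw : popW stack ord ans = (stack, ord, ans) := by
      cases stack with
      | nil => rfl
      | cons s st =>
        have hns : ¬ (ord.head? = some s) := by
          intro hc
          exact h2 ⟨by simp, by rintro rfl; simp at hc, by simp [hc]⟩
        simp [popW, hns]
    rw [hpw]
    rfl

-- altWhile on index k over `order` = popW on the suffix `order.drop k`.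
theorem altWhile_eq_popW (order : List Int) :
    ∀ (stack : List Int) (k : Nat) (ans : Int), k ≤ order.length →
      ∃ k', k ≤ k' ∧ k' ≤ order.length ∧
        popW stack (order.drop k) ans =
          ((altWhile order stack (k : Int) ans).1, order.drop k',
            (altWhile order stack (k : Int) ans).2.2) ∧
        (altWhile order stack (k : Int) ans).2.1 = (k' : Int) := by
  intro stack
  induction stack with
  | nil =>
    intro k ans hk
    exact ⟨k, le_refl _, hk, rfl, rfl⟩
  | cons t st ih =>
    intro k ans hk
    by_cases hc : (order.drop k).head? = some t
    · have hgk : order[k]? = some t := by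
        rw [← List.head?_drop]; exact hc
      have hklt : k < order.length := by
        have := List.getElem?_eq_some_iff.mp hgk
        exact this.1
      have hcond : (k : Int) < (order.length : Int) ∧
          PySem.List.pyGet? order (k : Int) = some t := by
        constructor
        · exact_mod_cast hklt
        · rw [PySem.List.pyGet?_natCast]; exact hgk
      have hrec : altWhile order (t :: st) (k : Int) ans
          = altWhile order st ((k : Int) + 1) (ans + 1) := by
        simp only [altWhile, if_pos hcond]
      have hcast : ((k : Int) + 1) = ((k + 1 : Nat) : Int) := by push_cast; ring
      obtain ⟨k', h1, h2, h3, h4⟩ := ih (k + 1) (ans + 1) (by omega)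
      refine ⟨k', by omega, h2, ?_, ?_⟩
      · rw [hrec, hcast]
        simp only [popW, if_pos hc, List.tail_drop]
        exact h3
      · rw [hrec, hcast]; exact h4
    · have hcond : ¬ ((k : Int) < (order.length : Int) ∧
          PySem.List.pyGet? order (k : Int) = some t) := by
        intro hcc
        apply hc
        rw [List.head?_drop]
        rw [PySem.List.pyGet?_natCast] at hcc
        exact hcc.2
      have : altWhile order (t :: st) (k : Int) ans = (t :: st, (k : Int), ans) := by
        simp only [altWhile, if_neg hcond]
      refine ⟨k, le_refl _, hk, ?_, by rw [this]⟩
      rw [this]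
      simp only [popW, if_neg hc]

-- B's foldl with an index = runB on the remaining suffix.
theorem foldl_eq_runB (order : List Int) :
    ∀ (bs stack : List Int) (k : Nat) (ans : Int), k ≤ order.length →
      (bs.foldl (fun (s : List Int × Int × Int) i => altWhile order (i :: s.1) s.2.1 s.2.2)
        (stack, (k : Int), ans)).2.2
      = runB bs (order.drop k) stack ans := by
  intro bs
  induction bs with
  | nil => intro stack k ans hk; rfl
  | cons b bt ih =>
    intro stack k ans hk
    obtain ⟨k', hk1, hk2, hpop, hidx⟩ := altWhile_eq_popW order (b :: stack) k ans hk
    simp only [List.foldl_cons, runB]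
    rw [hpop]
    have : altWhile order (b :: stack) (k : Int) ans
        = ((altWhile order (b :: stack) (k : Int) ans).1, (k' : Int),
           (altWhile order (b :: stack) (k : Int) ans).2.2) := by
      rw [← hidx]
    rw [this]
    exact ih _ k' _ hk2

-- ===== VERDICT (by name: the statement is the Claim_ definition above) =====
theorem solution_spec : Claim_equal_solution := by
  unfold Claim_equal_solution
  intro order _
  unfold Spec_solution solution solution_alt
  have hlen : (PySem.List.pyRange 1 ((order.length : Int) + 1) 1).length = order.length := by
    rw [PySem.List.length_pyRange_one]; omega
  rw [loopA_eq_greedy _ _ _ _ _ (by rw [hlen]; simp; omega)]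
  have hnd : (([] : List Int) ++ PySem.List.pyRange 1 ((order.length : Int) + 1) 1).Nodup := by
    simpa using PySem.List.nodup_pyRange_one 1 ((order.length : Int) + 1)
  rw [greedy_eq_runB _ _ _ _ hnd]
  have hfold := foldl_eq_runB order (PySem.List.pyRange 1 ((order.length : Int) + 1) 1)
    [] 0 0 (Nat.zero_le _)
  simp only [Nat.cast_zero, List.drop_zero] at hfold
  rw [hfold]
  simp [popW]
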